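-- pv_equiv track=rewrite | github.com/rtehok/perso-python | leetcode/2483_minimum-penalty-for-a-shop.py | bestClosingTimeTwoPasses
-- ===== SOURCE A (Python) =====
-- def bestClosingTimeTwoPasses(customers: str) -> int:
--     cur_penalty = min_penalty = customers.count("Y")
--     earliest_hour = 0
--
--     for i, ch in enumerate(customers):
--         if ch == "Y":
--             cur_penalty -= 1
--         else:
--             cur_penalty += 1
--
--         if cur_penalty < min_penalty:
--             min_penalty = cur_penalty
--             earliest_hour = i + 1
--
--     return earliest_hour
-- ===== SOURCE B (Python) =====
-- def bestClosingTimeTwoPasses(customers: str) -> int: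
--     n = len(customers)
--     total_y = customers.count("Y")
--     prefix_y = [0]
--     for ch in customers:
--         prefix_y.append(prefix_y[-1] + (1 if ch == "Y" else 0))
--     best_hour = 0
--     best_pen = total_y
--     for j in range(1, n + 1):
--         pen = (j - prefix_y[j]) + (total_y - prefix_y[j])
--         if pen < best_pen:
--             best_pen = pen
--             best_hour = j
--     return best_hour
-- ===== Notes on version B (the rewrite author's own statement) =====
-- stated objective: alternative
-- what changed: B replaces A's incremental +/-1 running-penalty update with an explicit prefix-count array of 'Y's built in a first pass and a second pass that evaluates the closed penalty formula (opens-N's + closed-Y's) at each hour, tracking the earliest strict minimum.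
import Mathlib
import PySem

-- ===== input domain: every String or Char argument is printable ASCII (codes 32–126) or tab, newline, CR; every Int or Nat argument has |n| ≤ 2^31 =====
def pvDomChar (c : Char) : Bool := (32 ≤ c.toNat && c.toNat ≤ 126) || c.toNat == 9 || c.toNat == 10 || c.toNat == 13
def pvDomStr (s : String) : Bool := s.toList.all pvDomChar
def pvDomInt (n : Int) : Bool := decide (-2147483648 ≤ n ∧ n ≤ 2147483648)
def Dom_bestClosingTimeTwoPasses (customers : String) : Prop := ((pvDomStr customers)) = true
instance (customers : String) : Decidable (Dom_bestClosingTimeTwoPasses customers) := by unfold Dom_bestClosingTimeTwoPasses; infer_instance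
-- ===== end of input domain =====

-- B replaces A's incremental ±1 running-penalty update with an explicit prefix-count array of 'Y's
-- and a second pass evaluating the closed penalty formula at each hour (objective: alternative decomposition).


-- ===== PORT A =====
def bestClosingTimeTwoPasses (customers : String) : Int :=
  let c : Int := (PySem.Str.count customers "Y" : Int)
  let st := (PySem.List.enumerate customers.toList 0).foldl
    (fun (st : Int × Int × Int) (p : Int × Char) =>
      let cur := if p.2 = 'Y' then st.1 - 1 else st.1 + 1
      if cur < st.2.1 then (cur, cur, p.1 + 1) else (cur, st.2.1, st.2.2))
    (c, c, 0)
  st.2.2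

-- ===== PORT B =====
def bestClosingTimeTwoPasses_alt (customers : String) : Int :=
  let n := customers.toList.length
  let totalY : Int := (PySem.Str.count customers "Y" : Int)
  let prefixY : List Int := customers.toList.foldl
    (fun acc ch => acc ++ [PySem.List.pyGetD acc (-1) 0 + (if ch = 'Y' then 1 else 0)]) [0]
  let st := (PySem.List.pyRange 1 ((n : Int) + 1) 1).foldl
    (fun (st : Int × Int) j =>
      let pen := (j - PySem.List.pyGetD prefixY j 0) + (totalY - PySem.List.pyGetD prefixY j 0)
      if pen < st.2 then (j, pen) else st)
    (0, totalY)
  st.1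

-- ===== PRECONDITION & SPEC =====
def Spec_bestClosingTimeTwoPasses (customers : String) (out : Int) : Prop := out = bestClosingTimeTwoPasses_alt customers
instance (customers : String) (out : Int) : Decidable (Spec_bestClosingTimeTwoPasses customers out) := by unfold Spec_bestClosingTimeTwoPasses; infer_instance

-- ===== CLAIM (what is proved, stated in full; the proofs are below) =====
def Claim_equal_bestClosingTimeTwoPasses : Prop := ∀ (customers : String), Dom_bestClosingTimeTwoPasses customers → Spec_bestClosingTimeTwoPasses customers (bestClosingTimeTwoPasses customers)

-- ===== LEMMAS AND PROOFS =====

-- the prefix list B builds: scanY a cs = [a, a + ind c₀, a + ind c₀ + ind c₁, …]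
def scanY (a : Int) : List Char → List Int
  | [] => [a]
  | c :: cs => a :: scanY (a + (if c = 'Y' then 1 else 0)) cs

-- B's first loop builds exactly scanY 0 cs
theorem build_eq (cs : List Char) : ∀ (pre : List Int) (a : Int),
    cs.foldl (fun acc ch => acc ++ [PySem.List.pyGetD acc (-1) 0 + (if ch = 'Y' then 1 else 0)]) (pre ++ [a])
      = pre ++ scanY a cs := by
  induction cs with
  | nil => intro pre a; simp [scanY]
  | cons c cs ih =>
    intro pre a
    simp only [List.foldl_cons, PySem.List.pyGetD_neg_one_append_singleton]
    have h := ih (pre ++ [a]) (a + (if c = 'Y' then 1 else 0))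
    simpa [scanY] using h

theorem scanY_getD (cs : List Char) : ∀ (a : Int) (j : Nat), j ≤ cs.length →
    (scanY a cs).getD j 0 = a + (((cs.take j).count 'Y' : Nat) : Int) := by
  induction cs with
  | nil =>
    intro a j hj
    cases j with
    | zero => simp [scanY]
    | succ j => simp at hj
  | cons c cs ih =>
    intro a j hj
    cases j with
    | zero => simp [scanY]
    | succ j =>
      have := ih (a + (if c = 'Y' then 1 else 0)) j (by simpa using hj)
      simp only [scanY, List.getD_cons_succ, this, List.take_succ_cons, List.count_cons]
      by_cases hc : c = 'Y'
      · simp [hc]; ring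
      · simp [hc]

-- the loop-level correspondence: A's running penalty is the closed formula B evaluates
theorem main_loop (cs : List Char) (T : Int) : ∀ (ds : List Char) (i : Nat) (minp hour : Int),
    cs.drop i = ds →
    ((PySem.List.enumerate ds (i : Int)).foldl
      (fun (st : Int × Int × Int) (p : Int × Char) =>
        let cur := if p.2 = 'Y' then st.1 - 1 else st.1 + 1
        if cur < st.2.1 then (cur, cur, p.1 + 1) else (cur, st.2.1, st.2.2))
      (T + (i : Int) - 2 * (((cs.take i).count 'Y' : Nat) : Int), minp, hour)).2
    = Prod.swap ((PySem.List.pyRange ((i : Int) + 1) ((cs.length : Int) + 1) 1).foldl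
      (fun (st : Int × Int) j =>
        let pen := (j - PySem.List.pyGetD (scanY 0 cs) j 0) + (T - PySem.List.pyGetD (scanY 0 cs) j 0)
        if pen < st.2 then (j, pen) else st)
      (hour, minp)) := by
  intro ds
  induction ds with
  | nil =>
    intro i minp hour h
    have hlen : cs.length ≤ i := by
      simpa using List.drop_eq_nil_iff.mp h
    rw [PySem.List.enumerate_nil, PySem.List.pyRange_one_eq_nil (by exact_mod_cast by omega)]
    simp
  | cons d ds ih =>
    intro i minp hour h
    have hi : i < cs.length := by
      by_contra hcon
      rw [List.drop_eq_nil_iff.mpr (by omega)] at h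
      simp at h
    have hdrop : cs.drop (i + 1) = ds := by
      rw [← List.tail_drop, h]; rfl
    have htake : cs.take (i + 1) = cs.take i ++ [d] := by
      have h1 : cs.take (i + 1) = cs.take i ++ (cs.drop i).take 1 := List.take_add
      rw [h1, h]; rfl
    -- length of scanY
    have hcnt : (((cs.take (i+1)).count 'Y' : Nat) : Int)
        = (((cs.take i).count 'Y' : Nat) : Int) + (if d = 'Y' then 1 else 0) := by
      rw [htake]
      by_cases hd : d = 'Y' <;> simp [hd]
    have hscan : (scanY 0 cs).getD (i + 1) 0 = (((cs.take (i+1)).count 'Y' : Nat) : Int) := by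
      rw [scanY_getD cs 0 (i+1) (by omega)]; ring
    have hcur : (if d = 'Y' then (T + (i : Int) - 2 * (((cs.take i).count 'Y' : Nat) : Int)) - 1
          else (T + (i : Int) - 2 * (((cs.take i).count 'Y' : Nat) : Int)) + 1)
        = T + ((i : Int) + 1) - 2 * (((cs.take (i+1)).count 'Y' : Nat) : Int) := by
      rw [hcnt]; by_cases hd : d = 'Y' <;> simp [hd] <;> ring
    have hpenD : PySem.List.pyGetD (scanY 0 cs) ((i : Int) + 1) 0
        = (((cs.take (i+1)).count 'Y' : Nat) : Int) := by
      have : ((i : Int) + 1) = ((i + 1 : Nat) : Int) := by push_cast; ring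
      rw [this, PySem.List.pyGetD_natCast, hscan]
    have hpen : ((i : Int) + 1 - PySem.List.pyGetD (scanY 0 cs) ((i : Int) + 1) 0)
          + (T - PySem.List.pyGetD (scanY 0 cs) ((i : Int) + 1) 0)
        = T + ((i : Int) + 1) - 2 * (((cs.take (i+1)).count 'Y' : Nat) : Int) := by
      rw [hpenD]; ring
    rw [PySem.List.enumerate_cons, PySem.List.pyRange_one_cons (by
      have : (i : Int) < (cs.length : Int) := by exact_mod_cast hi
      omega)]
    simp only [List.foldl_cons]
    by_cases hlt : T + ((i : Int) + 1) - 2 * (((cs.take (i+1)).count 'Y' : Nat) : Int) < minp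
    · simp only [hcur, hpen, if_pos hlt]
      have := ih (i + 1) (T + ((i : Int) + 1) - 2 * (((cs.take (i+1)).count 'Y' : Nat) : Int))
        ((i : Int) + 1) hdrop
      simpa using this
    · simp only [hcur, hpen, if_neg hlt]
      have := ih (i + 1) minp hour hdrop
      simpa using this

-- ===== VERDICT (by name: the statement is the Claim_ definition above) =====
theorem bestClosingTimeTwoPasses_spec : Claim_equal_bestClosingTimeTwoPasses := by
  intro customers _
  unfold Spec_bestClosingTimeTwoPasses bestClosingTimeTwoPasses bestClosingTimeTwoPasses_alt
  have hbuild := build_eq customers.toList [] 0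
  simp only [List.nil_append] at hbuild
  have h := main_loop customers.toList (PySem.Str.count customers "Y" : Int)
    customers.toList 0 (PySem.Str.count customers "Y" : Int) 0 (by simp)
  simp only [Nat.cast_zero, List.take_zero, List.count_nil, add_zero, mul_zero, sub_zero,
    zero_add] at h
  simp only [hbuild]
  simpa using congrArg Prod.snd h
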